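-- pv_equiv track=rewrite | github.com/mcraig10/StorageCode | ResultsAnalysisNonoptimalDayComparison.py | isolateDiffDaysGen
-- ===== SOURCE A (Python) =====
-- def isolateDiffDaysGen(diffDayHourSymbols,gen):
--     colsToRemove = list()
--     colsToSave = list()
--     for col in range(1,len(gen[0])):
--         if gen[0][col] not in diffDayHourSymbols:
--             colsToRemove.append(col)
--         else:
--             colsToSave.append(col)
--     slimGen = list()
--     for idx in range(len(gen)): slimGen.append([gen[idx][0]])
--     for col in range(1,len(gen[0])):
--         if col not in colsToRemove:
--             for idx in range(len(slimGen)): slimGen[idx].append(gen[idx][col])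
--     return slimGen
-- ===== SOURCE B (Python) =====
-- def isolateDiffDaysGen(diffDayHourSymbols, gen):
--     hdr = gen[0]
--     keep = [0] + [c for c in range(1, len(hdr)) if hdr[c] in diffDayHourSymbols]
--     return [[row[c] for c in keep] for row in gen]
-- ===== Notes on version B (the rewrite author's own statement) =====
-- stated objective: simpler
-- what changed: Replaces A's three passes (classify columns into remove/save lists, seed each output row with column 0, then for each kept column append to every row) by one precomputed keep-index list and a single row-outer pass that projects each row through it.
import Mathlib
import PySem

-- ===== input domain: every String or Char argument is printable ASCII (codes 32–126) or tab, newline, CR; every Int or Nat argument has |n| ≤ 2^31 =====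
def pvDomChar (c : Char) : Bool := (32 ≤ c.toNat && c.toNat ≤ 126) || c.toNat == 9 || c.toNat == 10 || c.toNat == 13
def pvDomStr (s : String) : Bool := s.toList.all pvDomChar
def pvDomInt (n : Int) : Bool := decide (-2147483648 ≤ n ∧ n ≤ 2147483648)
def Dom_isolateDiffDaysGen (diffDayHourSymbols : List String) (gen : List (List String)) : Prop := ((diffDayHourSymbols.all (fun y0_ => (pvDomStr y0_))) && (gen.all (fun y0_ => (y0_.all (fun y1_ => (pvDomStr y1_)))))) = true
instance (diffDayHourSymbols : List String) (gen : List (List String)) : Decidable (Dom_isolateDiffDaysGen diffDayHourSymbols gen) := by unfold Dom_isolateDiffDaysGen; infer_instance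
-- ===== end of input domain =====

-- B replaces A's three column-outer passes by one precomputed keep-index list and a single
-- row-outer projection pass; equivalence of return values is proved on Pre_ (where Python A
-- returns without an IndexError).

-- ===== PORT A =====
-- Indexing uses pyGet? with a .getD fallback; inside Pre_ every access is in range, so the
-- port is exact there (outside Pre_ Python raises IndexError).
def isolateDiffDaysGen (diffDayHourSymbols : List String) (gen : List (List String)) : List (List String) :=
  let hdr := (PySem.List.pyGet? gen 0).getD []
  let cr := (PySem.List.pyRange 1 (hdr.length : Int) 1).foldl
      (fun (p : List Int × List Int) col =>
        if !(diffDayHourSymbols.contains ((PySem.List.pyGet? hdr col).getD ""))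
        then (p.1 ++ [col], p.2)
        else (p.1, p.2 ++ [col]))
      ([], [])
  let colsToRemove := cr.1
  let slimGen := (PySem.List.pyRange 0 (gen.length : Int) 1).map
      (fun idx => [((PySem.List.pyGet? ((PySem.List.pyGet? gen idx).getD []) 0).getD "")])
  (PySem.List.pyRange 1 (hdr.length : Int) 1).foldl
    (fun slim col =>
      if !(colsToRemove.contains col) then
        slim.mapIdx (fun idx row =>
          row ++ [((PySem.List.pyGet? ((PySem.List.pyGet? gen (idx : Int)).getD []) col).getD "")])
      else slim)
    slimGen

-- ===== PORT B =====
def isolateDiffDaysGen_alt (diffDayHourSymbols : List String) (gen : List (List String)) : List (List String) :=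
  let hdr := (PySem.List.pyGet? gen 0).getD []
  let keep : List Int := 0 :: (PySem.List.pyRange 1 (hdr.length : Int) 1).filter
      (fun c => diffDayHourSymbols.contains ((PySem.List.pyGet? hdr c).getD ""))
  gen.map (fun row => keep.map (fun c => (PySem.List.pyGet? row c).getD ""))

-- ===== PRECONDITION & SPEC =====
-- Pre_ excludes exactly the inputs where Python A raises IndexError: empty gen (gen[0]),
-- an empty row (gen[idx][0]), or a row too short for a kept column (gen[idx][col]).
def Pre_isolateDiffDaysGen (diffDayHourSymbols : List String) (gen : List (List String)) : Prop :=
  gen ≠ [] ∧ ∀ row ∈ gen, row ≠ [] ∧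
    ∀ c : Nat, 1 ≤ c → c < (gen.headD []).length →
      ((gen.headD []).getD c "") ∈ diffDayHourSymbols → c < row.length
instance (diffDayHourSymbols : List String) (gen : List (List String)) : Decidable (Pre_isolateDiffDaysGen diffDayHourSymbols gen) := by unfold Pre_isolateDiffDaysGen; infer_instance

def pvWitness_isolateDiffDaysGen : List String × List (List String) :=
  (["h2"], [["id", "h1", "h2"], ["a", "b", "c"], ["d", "e", "f"]])

def Spec_isolateDiffDaysGen (diffDayHourSymbols : List String) (gen : List (List String)) (out : List (List String)) : Prop := out = isolateDiffDaysGen_alt diffDayHourSymbols gen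
instance (diffDayHourSymbols : List String) (gen : List (List String)) (out : List (List String)) : Decidable (Spec_isolateDiffDaysGen diffDayHourSymbols gen out) := by unfold Spec_isolateDiffDaysGen; infer_instance

-- ===== CLAIM (what is proved, stated in full; the proofs are below) =====
def Claim_equal_isolateDiffDaysGen : Prop := ∀ (diffDayHourSymbols : List String) (gen : List (List String)), Dom_isolateDiffDaysGen diffDayHourSymbols gen → Pre_isolateDiffDaysGen diffDayHourSymbols gen → Spec_isolateDiffDaysGen diffDayHourSymbols gen (isolateDiffDaysGen diffDayHourSymbols gen)

-- ===== LEMMAS AND PROOFS =====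

-- A's first loop: the pair fold's first component is the filtered list.
theorem pv_pairfold_fst (l : List Int) (p : Int → Bool) (a b : List Int) :
    (l.foldl (fun (q : List Int × List Int) col =>
        if p col then (q.1 ++ [col], q.2) else (q.1, q.2 ++ [col])) (a, b)).1
      = a ++ l.filter p := by
  induction l generalizing a b with
  | nil => simp
  | cons x xs ih =>
    by_cases h : p x <;> simp [h, ih]

-- guarded fold = fold over the filtered list
theorem pv_foldl_if_filter {α β : Type} (l : List β) (p : β → Bool)
    (g : α → β → α) (init : α) :
    l.foldl (fun acc x => if p x then g acc x else acc) init
      = (l.filter p).foldl g init := by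
  induction l generalizing init with
  | nil => rfl
  | cons x xs ih =>
    by_cases h : p x <;> simp [h, ih]

theorem pv_mapIdx_mapIdx {α β γ : Type} (l : List α) (f : Nat → α → β) (g : Nat → β → γ) :
    (l.mapIdx f).mapIdx g = l.mapIdx (fun i x => g i (f i x)) := by
  apply List.ext_getElem <;> simp

-- A's column-append fold over the kept columns, in closed row form
theorem pv_foldl_append_cols (cols : List Int) (f : Nat → Int → String)
    (init : List (List String)) :
    cols.foldl (fun slim col =>
        slim.mapIdx (fun idx row => row ++ [f idx col])) init
      = init.mapIdx (fun idx row => row ++ cols.map (f idx)) := by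
  induction cols generalizing init with
  | nil =>
    apply List.ext_getElem <;> simp
  | cons c cs ih =>
    simp only [List.foldl_cons, ih, pv_mapIdx_mapIdx, List.append_assoc, List.map_cons,
      List.singleton_append]

-- the second fold, written with A's 'col not in colsToRemove' guard, runs G exactly on the kept columns
-- the second fold, written with A's 'col not in colsToRemove' guard, runs G exactly on the kept columns
theorem pv_guard_fold (n : Int) (p : Int → Bool)
    (G : List (List String) → Int → List (List String)) (init : List (List String)) :
    (PySem.List.pyRange 1 n 1).foldl (fun slim col =>
        if !(((PySem.List.pyRange 1 n 1).filter (fun c => !(p c))).contains col)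
        then G slim col else slim) init
      = ((PySem.List.pyRange 1 n 1).filter p).foldl G init := by
  have h : ∀ (acc : List (List String)), ∀ col ∈ PySem.List.pyRange 1 n 1,
      (if !(((PySem.List.pyRange 1 n 1).filter (fun c => !(p c))).contains col)
       then G acc col else acc)
      = (if p col then G acc col else acc) := by
    intro acc col hcol
    have hmem : ((PySem.List.pyRange 1 n 1).filter (fun c => !(p c))).contains col
        = !(p col) := by
      by_cases hpc : p col <;>
        simp [List.mem_filter, hcol, hpc]
    rw [hmem]
    by_cases hpc : p col <;> simp [hpc]
  exact (PySem.List.foldl_congr_mem _ _ _ _ h).trans (pv_foldl_if_filter _ _ _ _)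

-- ===== VERDICT (by name: the statement is the Claim_ definition above) =====
theorem isolateDiffDaysGen_spec : Claim_equal_isolateDiffDaysGen := by
  intro syms gen _ hpre
  obtain ⟨hne, hrows⟩ := hpre
  obtain ⟨hdr0, rest, rfl⟩ := List.exists_cons_of_ne_nil hne
  unfold Spec_isolateDiffDaysGen isolateDiffDaysGen isolateDiffDaysGen_alt
  simp only [PySem.List.pyGet?_zero_cons, Option.getD_some]
  rw [pv_pairfold_fst, List.nil_append, pv_guard_fold, pv_foldl_append_cols]
  apply List.ext_getElem
  · simp
  · intro k hk1 hk2
    have hk : k < (hdr0 :: rest).length := by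
      simpa [PySem.List.pyRange_zero_nat] using hk1
    simp only [List.getElem_mapIdx, PySem.List.pyRange_zero_nat, List.getElem_map,
      List.getElem_range]
    have hget : (PySem.List.pyGet? (hdr0 :: rest) ((k : Nat) : Int)).getD []
        = (hdr0 :: rest)[k] := by
      rw [PySem.List.pyGet?_natCast]
      simp [List.getElem?_eq_getElem hk]
    rw [hget]
    simp
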